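-- pv_equiv track=rewrite | github.com/yuchdev/PyDocstring | src/pydocstring/normalize.py | strip_docstring_quotes
-- ===== SOURCE A (Python) =====
-- def strip_docstring_quotes(docstring_node_value: str) -> str:
--     """Strip triple-quote wrapping from a string literal value, return the inner text."""
--     s = docstring_node_value
--     for prefix in ('r"""', "r'''", 'u"""', "u'''", '"""', "'''"):
--         if s.startswith(prefix):
--             quote = prefix[-3:]
--             if s.endswith(quote):
--                 return s[len(prefix) : -3]
--     return s
-- ===== SOURCE B (Python) =====
-- def strip_docstring_quotes(docstring_node_value: str) -> str:
--     """Strip triple-quote wrapping from a string literal value, return the inner text."""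
--     s = docstring_node_value
--     offset = 1 if s[:1] in ('r', 'u') else 0
--     rest = s[offset:]
--     for quote in ('"""', "'''"):
--         if rest.startswith(quote) and rest.endswith(quote):
--             return s[offset + 3:-3]
--     return s
-- ===== Notes on version B (the rewrite author's own statement) =====
-- stated objective: simpler
-- what changed: A scans one glued list of six prefix+quote strings; B first peels an optional single-character string prefix (raw or unicode), recording an offset, and then tries only the two triple-quote styles on the remainder.
import Mathlib
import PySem

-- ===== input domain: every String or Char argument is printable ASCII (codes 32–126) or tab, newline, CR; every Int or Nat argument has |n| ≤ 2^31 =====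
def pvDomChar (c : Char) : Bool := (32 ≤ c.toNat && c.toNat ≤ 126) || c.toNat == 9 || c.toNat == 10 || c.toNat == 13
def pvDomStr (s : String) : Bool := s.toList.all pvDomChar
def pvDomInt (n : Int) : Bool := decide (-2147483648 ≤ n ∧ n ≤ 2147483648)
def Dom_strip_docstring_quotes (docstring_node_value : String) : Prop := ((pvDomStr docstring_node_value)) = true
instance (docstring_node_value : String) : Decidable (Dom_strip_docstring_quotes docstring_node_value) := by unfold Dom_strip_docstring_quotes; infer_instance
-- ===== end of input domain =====

-- B factors A's six glued prefixes into two steps (peel an optional one-character string prefix, then try the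
-- two quote styles on the remainder); objective: simpler. Equivalence is proved for all inputs.

-- ===== PORT A =====
-- for prefix in ('r"""', "r'''", 'u"""', "u'''", '"""', "'''"): if s.startswith(prefix):
--   quote = prefix[-3:]; if s.endswith(quote): return s[len(prefix):-3]
-- return s
def stripA_go (s : List Char) : List (List Char) → List Char
  | [] => s
  | p :: rest =>
      if PySem.Chars.startswith s p then
        let quote := PySem.Chars.slice p (some (-3)) none
        if PySem.Chars.endswith s quote then
          PySem.Chars.slice s (some (p.length : Int)) (some (-3))
        else stripA_go s rest
      else stripA_go s rest

def strip_docstring_quotes (docstring_node_value : String) : String :=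
  String.ofList (stripA_go docstring_node_value.toList
    [['r','"','"','"'], ['r','\'','\'','\''], ['u','"','"','"'], ['u','\'','\'','\''],
     ['"','"','"'], ['\'','\'','\'']])

-- ===== PORT B =====
-- offset = 1 if s[:1] in ('r','u') else 0; rest = s[offset:]
-- for quote in ('"""', "'''"): if rest.startswith(quote) and rest.endswith(quote): return s[offset+3:-3]
-- return s
def stripB_go (s rest : List Char) (offset : Int) : List (List Char) → List Char
  | [] => s
  | q :: qs =>
      if PySem.Chars.startswith rest q && PySem.Chars.endswith rest q then
        PySem.Chars.slice s (some (offset + 3)) (some (-3))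
      else stripB_go s rest offset qs

def strip_docstring_quotes_alt (docstring_node_value : String) : String :=
  let s := docstring_node_value.toList
  let offset : Int :=
    if PySem.Chars.slice s none (some 1) = ['r'] ∨ PySem.Chars.slice s none (some 1) = ['u']
    then 1 else 0
  let rest := PySem.Chars.slice s (some offset) none
  String.ofList (stripB_go s rest offset [['"','"','"'], ['\'','\'','\'']])

-- ===== PRECONDITION & SPEC =====
def Spec_strip_docstring_quotes (docstring_node_value : String) (out : String) : Prop := out = strip_docstring_quotes_alt docstring_node_value
instance (docstring_node_value : String) (out : String) : Decidable (Spec_strip_docstring_quotes docstring_node_value out) := by unfold Spec_strip_docstring_quotes; infer_instance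

-- ===== CLAIM (what is proved, stated in full; the proofs are below) =====
def Claim_equal_strip_docstring_quotes : Prop := ∀ (docstring_node_value : String), Dom_strip_docstring_quotes docstring_node_value → Spec_strip_docstring_quotes docstring_node_value (strip_docstring_quotes docstring_node_value)

-- ===== LEMMAS AND PROOFS =====

-- endswith ignores a leading char when the pattern is no longer than the tail
lemma ew_cons (c : Char) (t q : List Char) (h : q.length ≤ t.length) :
    PySem.Chars.endswith (c :: t) q = PySem.Chars.endswith t q := by
  simp only [PySem.Chars.endswith]
  rw [Bool.eq_iff_iff]
  simp only [List.isSuffixOf_iff_suffix]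
  constructor <;> intro hs
  · rcases List.suffix_cons_iff.mp hs with h1 | h1
    · exact absurd (congrArg List.length h1) (by simp; omega)
    · exact h1
  · exact hs.trans (List.suffix_cons c t)

lemma sw_head_ne (c d : Char) (t p : List Char) (h : (d == c) = false) :
    PySem.Chars.startswith (c :: t) (d :: p) = false := by
  simp [PySem.Chars.startswith, List.isPrefixOf, h]

lemma core_r (t : List Char) :
    stripA_go ('r'::t) [['r','"','"','"'], ['r','\'','\'','\''], ['u','"','"','"'], ['u','\'','\'','\''],
      ['"','"','"'], ['\'','\'','\'']] =
    stripB_go ('r'::t) t 1 [['"','"','"'], ['\'','\'','\'']] := by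
  simp only [stripA_go, stripB_go, PySem.Chars.startswith, List.isPrefixOf,
    show ('r' == 'r') = true from by decide, show ('u' == 'r') = false from by decide,
    show ('"' == 'r') = false from by decide, show ('\'' == 'r') = false from by decide,
    show PySem.Chars.slice ['r','"','"','"'] (some (-3)) none = ['"','"','"'] from by decide,
    show PySem.Chars.slice ['r','\'','\'','\''] (some (-3)) none = ['\'','\'','\''] from by decide,
    Bool.true_and, Bool.false_and, Bool.false_eq_true, if_false, List.length_cons, List.length_nil,
    show ((0+1+1+1+1 : Nat) : Int) = 1 + 3 from by norm_num]
  by_cases h1 : ['"','"','"'].isPrefixOf t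
  · have hl : (3:Nat) ≤ t.length := (List.isPrefixOf_iff_prefix.mp h1).length_le
    rw [ew_cons 'r' t ['"','"','"'] hl, ew_cons 'r' t ['\'','\'','\''] hl]
    by_cases h2 : ['\'','\'','\''].isPrefixOf t <;> simp [h1, h2]
  · by_cases h2 : ['\'','\'','\''].isPrefixOf t
    · have hl : (3:Nat) ≤ t.length := (List.isPrefixOf_iff_prefix.mp h2).length_le
      rw [ew_cons 'r' t ['\'','\'','\''] hl]
      simp [h1, h2]
    · simp [h1, h2]

lemma core_u (t : List Char) :
    stripA_go ('u'::t) [['r','"','"','"'], ['r','\'','\'','\''], ['u','"','"','"'], ['u','\'','\'','\''],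
      ['"','"','"'], ['\'','\'','\'']] =
    stripB_go ('u'::t) t 1 [['"','"','"'], ['\'','\'','\'']] := by
  simp only [stripA_go, stripB_go, PySem.Chars.startswith, List.isPrefixOf,
    show ('u' == 'u') = true from by decide, show ('r' == 'u') = false from by decide,
    show ('"' == 'u') = false from by decide, show ('\'' == 'u') = false from by decide,
    show PySem.Chars.slice ['u','"','"','"'] (some (-3)) none = ['"','"','"'] from by decide,
    show PySem.Chars.slice ['u','\'','\'','\''] (some (-3)) none = ['\'','\'','\''] from by decide,
    Bool.true_and, Bool.false_and, Bool.false_eq_true, if_false, List.length_cons, List.length_nil,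
    show ((0+1+1+1+1 : Nat) : Int) = 1 + 3 from by norm_num]
  by_cases h1 : ['"','"','"'].isPrefixOf t
  · have hl : (3:Nat) ≤ t.length := (List.isPrefixOf_iff_prefix.mp h1).length_le
    rw [ew_cons 'u' t ['"','"','"'] hl, ew_cons 'u' t ['\'','\'','\''] hl]
    by_cases h2 : ['\'','\'','\''].isPrefixOf t <;> simp [h1, h2]
  · by_cases h2 : ['\'','\'','\''].isPrefixOf t
    · have hl : (3:Nat) ≤ t.length := (List.isPrefixOf_iff_prefix.mp h2).length_le
      rw [ew_cons 'u' t ['\'','\'','\''] hl]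
      simp [h1, h2]
    · simp [h1, h2]

lemma core_other (c : Char) (t : List Char) (hr : (c == 'r') = false) (hu : (c == 'u') = false) :
    stripA_go (c::t) [['r','"','"','"'], ['r','\'','\'','\''], ['u','"','"','"'], ['u','\'','\'','\''],
      ['"','"','"'], ['\'','\'','\'']] =
    stripB_go (c::t) (c::t) 0 [['"','"','"'], ['\'','\'','\'']] := by
  have hr' : ('r' == c) = false := by
    simp only [beq_eq_false_iff_ne] at hr ⊢; exact hr.symm
  have hu' : ('u' == c) = false := by
    simp only [beq_eq_false_iff_ne] at hu ⊢; exact hu.symm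
  simp only [stripA_go, stripB_go,
    sw_head_ne c 'r' t _ hr', sw_head_ne c 'u' t _ hu',
    show PySem.Chars.slice ['"','"','"'] (some (-3)) none = ['"','"','"'] from by decide,
    show PySem.Chars.slice ['\'','\'','\''] (some (-3)) none = ['\'','\'','\''] from by decide,
    Bool.false_eq_true, if_false, List.length_cons, List.length_nil,
    show ((0+1+1+1 : Nat) : Int) = 0 + 3 from by norm_num]
  by_cases h1 : PySem.Chars.startswith (c::t) ['"','"','"'] <;>
    by_cases h2 : PySem.Chars.startswith (c::t) ['\'','\'','\''] <;>
      simp [h1, h2]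

lemma core (l : List Char) :
    stripA_go l [['r','"','"','"'], ['r','\'','\'','\''], ['u','"','"','"'], ['u','\'','\'','\''],
      ['"','"','"'], ['\'','\'','\'']] =
    (let offset : Int :=
      if PySem.Chars.slice l none (some 1) = ['r'] ∨ PySem.Chars.slice l none (some 1) = ['u']
      then 1 else 0
     stripB_go l (PySem.Chars.slice l (some offset) none) offset
       [['"','"','"'], ['\'','\'','\'']]) := by
  cases l with
  | nil => decide
  | cons c t =>
    have htake : PySem.Chars.slice (c::t) none (some 1) = [c] := by
      simp [PySem.List.slice_to (c::t) (show (0:Int) ≤ 1 by norm_num)]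
    by_cases hr : c = 'r'
    · subst hr
      simp only [htake, true_or, if_true,
        show PySem.Chars.slice ('r'::t) (some 1) none = t from by
          simp [PySem.List.slice_from ('r'::t) (show (0:Int) ≤ 1 by norm_num)]]
      exact core_r t
    · by_cases hu : c = 'u'
      · subst hu
        simp only [htake, or_true, if_true,
          show PySem.Chars.slice ('u'::t) (some 1) none = t from by
            simp [PySem.List.slice_from ('u'::t) (show (0:Int) ≤ 1 by norm_num)]]
        exact core_u t
      · have hcond : ¬ ([c] = ['r'] ∨ [c] = ['u']) := by
          rintro (h | h) <;> simp_all
        simp only [htake, if_neg hcond,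
          show PySem.Chars.slice (c::t) (some 0) none = c::t from by
            simp [PySem.List.slice_from (c::t) (show (0:Int) ≤ 0 by norm_num)]]
        exact core_other c t (by simp [hr]) (by simp [hu])

-- ===== VERDICT (by name: the statement is the Claim_ definition above) =====
theorem strip_docstring_quotes_spec : Claim_equal_strip_docstring_quotes := by
  intro v _
  unfold Spec_strip_docstring_quotes strip_docstring_quotes strip_docstring_quotes_alt
  exact congrArg String.ofList (core v.toList)
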